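-- pv_equiv track=rewrite | github.com/dadagust/PMLDL | server.py | trim_to_full_sentences
-- ===== SOURCE A (Python) =====
-- def trim_to_full_sentences(text):
--     # Define sentence-ending characters
--     sentence_endings = {'.', '?', '!'}
--     last_index = -1
--     for i in range(len(text) - 1, -1, -1):
--         if text[i] in sentence_endings:
--             last_index = i
--             break
--     return text[:last_index + 1] if last_index != -1 else text
-- ===== SOURCE B (Python) =====
-- def trim_to_full_sentences(text):
--     last_index = max(text.rfind('.'), text.rfind('?'), text.rfind('!'))
--     return text[:last_index + 1] if last_index != -1 else text
-- ===== Notes on version B (the rewrite author's own statement) =====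
-- stated objective: idiomatic
-- what changed: Replaces the manual right-to-left index loop with break by three built-in reverse searches (rfind for '.', '?', '!') combined with max, keeping the -1 guard.
import Mathlib
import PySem

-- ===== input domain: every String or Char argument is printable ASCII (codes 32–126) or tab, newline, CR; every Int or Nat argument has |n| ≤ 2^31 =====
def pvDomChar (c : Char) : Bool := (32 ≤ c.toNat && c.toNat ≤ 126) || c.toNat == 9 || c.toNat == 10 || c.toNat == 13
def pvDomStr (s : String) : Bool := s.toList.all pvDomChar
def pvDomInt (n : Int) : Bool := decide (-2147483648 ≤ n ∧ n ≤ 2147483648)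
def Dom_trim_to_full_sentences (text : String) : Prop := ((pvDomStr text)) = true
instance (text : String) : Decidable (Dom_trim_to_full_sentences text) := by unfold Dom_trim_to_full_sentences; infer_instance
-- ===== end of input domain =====

-- B replaces A's manual right-to-left index loop by three built-in reverse searches (rfind) combined with max (idiomatic; same cost).

-- ===== PORT A =====
def pvSentenceEndings : PySem.Set Char := PySem.Set.ofList ['.', '?', '!']

-- the 'for i in range(len(text)-1, -1, -1)' loop with its break, as recursion over the index list
def pvTrimLoop (text : String) : List Int → Int
  | [] => -1
  | i :: rest =>
    match PySem.Str.pyGet? text i with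
    | some c => if PySem.Set.contains pvSentenceEndings c then i else pvTrimLoop text rest
    | none => -1  -- unreachable: every i produced by range(len(text)-1, -1, -1) is in range

def trim_to_full_sentences (text : String) : String :=
  let last_index := pvTrimLoop text (PySem.List.pyRange ((PySem.Str.len text : Int) - 1) (-1) (-1))
  if last_index ≠ -1 then PySem.Str.slice text none (some (last_index + 1)) else text

-- ===== PORT B =====
def trim_to_full_sentences_alt (text : String) : String :=
  let last_index := max (max (PySem.Str.rfind text ".") (PySem.Str.rfind text "?")) (PySem.Str.rfind text "!")
  if last_index ≠ -1 then PySem.Str.slice text none (some (last_index + 1)) else text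

-- ===== PRECONDITION & SPEC =====
def Spec_trim_to_full_sentences (text : String) (out : String) : Prop := out = trim_to_full_sentences_alt text
instance (text : String) (out : String) : Decidable (Spec_trim_to_full_sentences text out) := by unfold Spec_trim_to_full_sentences; infer_instance

-- ===== CLAIM (what is proved, stated in full; the proofs are below) =====
def Claim_equal_trim_to_full_sentences : Prop := ∀ (text : String), Dom_trim_to_full_sentences text → Spec_trim_to_full_sentences text (trim_to_full_sentences text)

-- ===== LEMMAS AND PROOFS =====

-- rfind of the single char c among indices < k
def pvSpecC (l : List Char) (c : Char) : Nat → Int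
  | 0 => -1
  | k+1 => if l[k]? = some c then (k : Int) else pvSpecC l c k

-- A's loop result among indices < k
def pvSpec (l : List Char) : Nat → Int
  | 0 => -1
  | k+1 => if l[k]? = some '.' ∨ l[k]? = some '?' ∨ l[k]? = some '!' then (k : Int) else pvSpec l k

theorem pvSpecC_lt (l : List Char) (c : Char) : ∀ k : Nat, pvSpecC l c k < (k : Int) := by
  intro k
  induction k with
  | zero => simp [pvSpecC]
  | succ k ih =>
    simp only [pvSpecC]
    split
    · push_cast; omega
    · push_cast at *; omega

theorem pvContains_endings (c : Char) :
    (PySem.Set.contains pvSentenceEndings c = true) ↔ (c = '.' ∨ c = '?' ∨ c = '!') := by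
  have h : pvSentenceEndings = ['.', '?', '!'] := by decide
  rw [h]
  simp [PySem.Set.contains, List.contains_eq_mem]

theorem pvPrefix_single (l : List Char) (c : Char) (j : Nat) :
    ([c] <+: l.drop j) ↔ l[j]? = some c := by
  cases hxs : l.drop j with
  | nil =>
    have hlen : l.length ≤ j := by
      have := congrArg List.length hxs
      simp at this; omega
    simp [List.getElem?_eq_none_iff.mpr hlen]
  | cons a t =>
    have hh : l[j]? = some a := by
      rw [← List.head?_drop, hxs]; rfl
    simp [List.cons_prefix_cons, hh, eq_comm]

theorem pvGo_eq_specC (l : List Char) (c : Char) :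
    ∀ k : Nat, PySem.Chars.rfind.go l [c] k = pvSpecC l c (k+1) := by
  intro k
  induction k with
  | zero =>
    have h0 : ([c] <+: l) ↔ l[0]? = some c := by simpa using pvPrefix_single l c 0
    simp only [PySem.Chars.rfind.go, pvSpecC]
    simp [List.isPrefixOf_iff_prefix, h0]
  | succ j ih =>
    simp only [PySem.Chars.rfind.go]
    rw [ih]
    simp [List.isPrefixOf_iff_prefix, pvPrefix_single, pvSpecC]

theorem pvRfind_eq_specC (l : List Char) (c : Char) :
    PySem.Chars.rfind l [c] = pvSpecC l c l.length := by
  rw [PySem.Chars.rfind, pvGo_eq_specC]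
  show pvSpecC l c (l.length + 1) = pvSpecC l c l.length
  simp only [pvSpecC]
  rw [if_neg]
  simp

theorem pvMax3_eq_spec (l : List Char) :
    ∀ k : Nat, max (max (pvSpecC l '.' k) (pvSpecC l '?' k)) (pvSpecC l '!' k) = pvSpec l k := by
  intro k
  induction k with
  | zero => simp [pvSpecC, pvSpec]
  | succ k ih =>
    have hd := pvSpecC_lt l '.' k
    have hq := pvSpecC_lt l '?' k
    have he := pvSpecC_lt l '!' k
    simp only [pvSpecC, pvSpec]
    rcases h : l[k]? with _ | a
    · simpa using ih
    · by_cases hd' : a = '.'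
      · subst hd'
        rw [if_pos rfl, if_neg (by intro hh; cases hh), if_neg (by intro hh; cases hh), if_pos (Or.inl rfl)]
        omega
      · by_cases hq' : a = '?'
        · subst hq'
          rw [if_neg (by intro hh; cases hh), if_pos rfl, if_neg (by intro hh; cases hh), if_pos (Or.inr (Or.inl rfl))]
          omega
        · by_cases he' : a = '!'
          · subst he'
            rw [if_neg (by intro hh; cases hh), if_neg (by intro hh; cases hh), if_pos rfl, if_pos (Or.inr (Or.inr rfl))]
            omega
          · rw [if_neg (by intro hh; exact hd' (Option.some.inj hh)),
                if_neg (by intro hh; exact hq' (Option.some.inj hh)),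
                if_neg (by intro hh; exact he' (Option.some.inj hh)),
                if_neg (by rintro (hh | hh | hh) <;> simp_all)]
            exact ih

theorem pvLoop_eq_spec (text : String) :
    ∀ k : Nat, k ≤ text.toList.length →
      pvTrimLoop text (PySem.List.pyRange ((k : Int) - 1) (-1) (-1)) = pvSpec text.toList k := by
  intro k
  induction k with
  | zero =>
    intro _
    rw [show ((0 : Nat) : Int) - 1 = -1 by norm_num, PySem.List.pyRange_neg_one_eq_nil (by omega)]
    simp [pvTrimLoop, pvSpec]
  | succ k ih =>
    intro hk
    have hk' : k < text.toList.length := by omega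
    have hcons : PySem.List.pyRange (((k+1 : Nat) : Int) - 1) (-1) (-1)
        = (k : Int) :: PySem.List.pyRange ((k : Int) - 1) (-1) (-1) := by
      rw [show (((k+1 : Nat) : Int) - 1) = (k : Int) by push_cast; ring]
      rw [PySem.List.pyRange_neg_one_cons (by omega)]
    rw [hcons]
    simp only [pvTrimLoop]
    have hget : PySem.Str.pyGet? text ((k : Nat) : Int) = some (text.toList[k]) := by
      simp [List.getElem?_eq_getElem hk']
    rw [hget]
    have hl : text.toList[k]? = some (text.toList[k]) := List.getElem?_eq_getElem hk'
    simp only [pvSpec, hl, Option.some.injEq]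
    by_cases hc : text.toList[k] = '.' ∨ text.toList[k] = '?' ∨ text.toList[k] = '!'
    · rw [if_pos ((pvContains_endings _).mpr hc), if_pos hc]
    · rw [if_neg (fun hh => hc ((pvContains_endings _).mp hh)), if_neg hc]
      exact ih (by omega)

theorem pvLast_eq (text : String) :
    pvTrimLoop text (PySem.List.pyRange ((PySem.Str.len text : Int) - 1) (-1) (-1))
      = max (max (PySem.Str.rfind text ".") (PySem.Str.rfind text "?")) (PySem.Str.rfind text "!") := by
  have hlen : (PySem.Str.len text : Int) = ((text.toList.length : Nat) : Int) := by
    simp [PySem.Str.len]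
  rw [hlen, pvLoop_eq_spec text text.toList.length (le_refl _)]
  have hr : ∀ c : Char, PySem.Chars.rfind text.toList [c] = pvSpecC text.toList c text.toList.length :=
    fun c => pvRfind_eq_specC _ c
  rw [show PySem.Str.rfind text "." = PySem.Chars.rfind text.toList ['.'] by simp [PySem.Str.rfind_eq],
      show PySem.Str.rfind text "?" = PySem.Chars.rfind text.toList ['?'] by simp [PySem.Str.rfind_eq],
      show PySem.Str.rfind text "!" = PySem.Chars.rfind text.toList ['!'] by simp [PySem.Str.rfind_eq],
      hr, hr, hr, pvMax3_eq_spec]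

-- ===== VERDICT (by name: the statement is the Claim_ definition above) =====
theorem trim_to_full_sentences_spec : Claim_equal_trim_to_full_sentences := by
  intro text _
  unfold Spec_trim_to_full_sentences trim_to_full_sentences trim_to_full_sentences_alt
  rw [pvLast_eq]
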